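-- pv_equiv track=rewrite | github.com/manimozhiyan-py/problems | string_10.py | captilize
-- ===== SOURCE A (Python) =====
-- def captilize(string):
--     result = ""
--     for index in range(len(string)):
--         if index == 0 or index == len(string)-1:
--             result += str.capitalize(string[index])
--
--         else:
--             result += string[index]
--
--
--     return result
-- ===== SOURCE B (Python) =====
-- def captilize(string):
--     if len(string) <= 1:
--         return string.capitalize()
--     return string[0].capitalize() + string[1:-1] + string[-1].capitalize()
-- ===== Notes on version B (the rewrite author's own statement) =====
-- stated objective: faster
-- what changed: Replaces the per-index loop with its boundary test and repeated string concatenation by three direct pieces: capitalize the first and last characters and keep the middle slice unchanged, with one up-front case for strings of length <= 1.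
import Mathlib
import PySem

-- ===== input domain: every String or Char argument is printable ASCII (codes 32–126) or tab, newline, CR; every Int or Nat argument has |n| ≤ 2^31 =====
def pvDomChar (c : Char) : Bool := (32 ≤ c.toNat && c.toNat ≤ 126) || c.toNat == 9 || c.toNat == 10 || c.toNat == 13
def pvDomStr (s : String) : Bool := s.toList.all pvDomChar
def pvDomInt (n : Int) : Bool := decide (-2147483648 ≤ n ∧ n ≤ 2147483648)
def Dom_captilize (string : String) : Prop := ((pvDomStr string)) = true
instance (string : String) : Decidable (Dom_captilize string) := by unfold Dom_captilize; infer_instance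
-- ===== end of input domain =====

-- B capitalizes the first and last characters by direct slicing instead of A's per-index loop.

-- ===== PORT A =====
-- str.capitalize on a ONE-character string titlecases that character; on the ASCII
-- domain this is exactly PySem.Chars.upperChar (exact there).
def captilize (string : String) : String :=
  let cs := string.toList
  String.ofList ((PySem.List.pyRange 0 (PySem.Str.len string) 1).foldl
    (fun result index =>
      if index == 0 || index == PySem.Str.len string - 1 then
        result ++ [PySem.Chars.upperChar (PySem.List.pyGetD cs index ' ')]
      else
        result ++ [PySem.List.pyGetD cs index ' '])
    [])

-- ===== PORT B =====
-- string.capitalize(): first char titlecased (= upperChar on ASCII, exact there), rest lowered;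
-- string[0] / string[-1] are in range since len ≥ 2 there, so pyGetD's default is never used.
def captilize_alt (string : String) : String :=
  let cs := string.toList
  if cs.length ≤ 1 then
    String.ofList (match cs with
      | [] => []
      | c :: rest => PySem.Chars.upperChar c :: rest.map PySem.Chars.lowerChar)
  else
    String.ofList ([PySem.Chars.upperChar (PySem.List.pyGetD cs 0 ' ')]
      ++ PySem.List.slice cs (some 1) (some (-1))
      ++ [PySem.Chars.upperChar (PySem.List.pyGetD cs (-1) ' ')])

-- ===== PRECONDITION & SPEC =====
def Spec_captilize (string : String) (out : String) : Prop := out = captilize_alt string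
instance (string : String) (out : String) : Decidable (Spec_captilize string out) := by unfold Spec_captilize; infer_instance

-- ===== CLAIM (what is proved, stated in full; the proofs are below) =====
def Claim_equal_captilize : Prop := ∀ (string : String), Dom_captilize string → Spec_captilize string (captilize string)

-- ===== LEMMAS AND PROOFS =====

theorem captilize_lists (cs : List Char) :
    ((PySem.List.pyRange 0 (cs.length : Int) 1).foldl
      (fun result index =>
        if index == 0 || index == (cs.length : Int) - 1 then
          result ++ [PySem.Chars.upperChar (PySem.List.pyGetD cs index ' ')]
        else
          result ++ [PySem.List.pyGetD cs index ' '])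
      []) =
    (if cs.length ≤ 1 then
      (match cs with
        | [] => []
        | c :: rest => PySem.Chars.upperChar c :: rest.map PySem.Chars.lowerChar)
    else
      [PySem.Chars.upperChar (PySem.List.pyGetD cs 0 ' ')]
        ++ PySem.List.slice cs (some 1) (some (-1))
        ++ [PySem.Chars.upperChar (PySem.List.pyGetD cs (-1) ' ')]) := by
  have hfold :
      ((PySem.List.pyRange 0 (cs.length : Int) 1).foldl
        (fun result index =>
          if index == 0 || index == (cs.length : Int) - 1 then
            result ++ [PySem.Chars.upperChar (PySem.List.pyGetD cs index ' ')]
          else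
            result ++ [PySem.List.pyGetD cs index ' '])
        []) =
      (List.range cs.length).map (fun (k : ℕ) =>
        if ((k : Int) = 0 ∨ (k : Int) = (cs.length : Int) - 1) then
          PySem.Chars.upperChar (PySem.List.pyGetD cs (k : Int) ' ')
        else
          PySem.List.pyGetD cs (k : Int) ' ') := by
    rw [PySem.List.pyRange_one, List.foldl_map]
    rw [show (fun (result : List Char) (k : ℕ) =>
        if ((0:Int) + k) == 0 || ((0:Int)+k) == (cs.length : Int) - 1 then
          result ++ [PySem.Chars.upperChar (PySem.List.pyGetD cs ((0:Int)+k) ' ')]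
        else
          result ++ [PySem.List.pyGetD cs ((0:Int)+k) ' ']) =
        (fun (result : List Char) (k : ℕ) =>
          result ++ [if ((k : Int) = 0 ∨ (k : Int) = (cs.length : Int) - 1) then
            PySem.Chars.upperChar (PySem.List.pyGetD cs (k : Int) ' ')
          else
            PySem.List.pyGetD cs (k : Int) ' ']) from by
        funext r k
        simp only [zero_add, Bool.or_eq_true, beq_iff_eq]
        split <;> rfl]
    rw [PySem.List.foldl_append_singleton_eq_map]
    simp
  rw [hfold]
  match cs with
  | [] => simp
  | [c] => simp [PySem.List.pyGetD]
  | c :: d :: rest =>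
    rw [if_neg (by simp)]
    have hslice : PySem.List.slice (c::d::rest) (some 1) (some (-1)) = (d::rest).take rest.length := by
      simp [PySem.List.slice, PySem.List.clampIdx]
      rw [if_neg (by omega)]
      simp
    have hlast : PySem.List.pyGetD (c::d::rest) (-1) ' ' = (d::rest)[rest.length] := by
      simp [PySem.List.pyGetD, PySem.List.pyGet?, PySem.List.pyIdx?]
      rfl
    rw [hslice, hlast]
    apply List.ext_getElem
    · simp
    · intro i h1 h2
      simp only [List.getElem_map, List.getElem_range]
      simp only [List.length_map, List.length_range, List.length_cons] at h1
      by_cases h0 : i = 0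
      · subst h0
        rw [if_pos (by norm_num)]
        simp [PySem.List.pyGetD]
      · by_cases hl : i = rest.length + 1
        · subst hl
          rw [if_pos (by right; simp)]
          have hg : PySem.List.pyGetD (c::d::rest) ((rest.length + 1 : ℕ) : Int) ' ' = (d::rest)[rest.length] := by
            simp [PySem.List.pyGetD]
          rw [hg]
          rw [List.getElem_append_right (by simp)]
          simp
        · rw [if_neg (by simp; omega)]
          have hg : PySem.List.pyGetD (c::d::rest) ((i : ℕ) : Int) ' ' = (c::d::rest)[i] := by
            simp [PySem.List.pyGetD]
            rw [List.getElem?_eq_getElem (by simpa using h1)]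
            rfl
          rw [hg]
          rcases i with _ | j
          · omega
          · simp only [List.getElem_cons_succ]
            rw [List.getElem_append_left (by simp; omega)]
            simp [List.getElem_take]


-- ===== VERDICT (by name: the statement is the Claim_ definition above) =====
theorem captilize_spec : Claim_equal_captilize := by
  intro s _
  unfold Spec_captilize captilize captilize_alt
  have h : PySem.Str.len s = (s.toList.length : Int) := by
    simp [PySem.Str.len]
  simp only [h]
  rw [captilize_lists s.toList]
  split <;> rfl
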